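-- pv_equiv track=rewrite | github.com/ikepawsat/CapstoneWebsite | dashboard/views.py | get_boston_qual_time
-- ===== SOURCE A (Python) =====
-- def get_boston_qual_time(age: int, gender: str) -> int:
--     """Return Boston Marathon qualifying time (in seconds) for given age and gender."""
--     standards = [
--         (34, {"M": "2:55:00", "F": "3:25:00"}),
--         (39, {"M": "3:00:00", "F": "3:30:00"}),
--         (44, {"M": "3:05:00", "F": "3:35:00"}),
--         (49, {"M": "3:15:00", "F": "3:45:00"}),
--         (54, {"M": "3:20:00", "F": "3:50:00"}),
--         (59, {"M": "3:30:00", "F": "4:00:00"}),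
--         (64, {"M": "3:50:00", "F": "4:20:00"}),
--         (69, {"M": "4:05:00", "F": "4:35:00"}),
--         (74, {"M": "4:20:00", "F": "4:50:00"}),
--         (79, {"M": "4:35:00", "F": "5:05:00"}),
--         (200, {"M": "4:50:00", "F": "5:20:00"}),  # 80+
--     ]
--
--     gender = gender.upper()[0] if gender else "M"
--     if gender not in ("M", "F"):
--         raise ValueError("Gender must be 'M' or 'F'")
--
--     for upper_age, times in standards:
--         if age <= upper_age:
--             h, m, s = map(int, times[gender].split(":"))
--             return h * 3600 + m * 60 + s
--
--     # fallback
--     return 999999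
-- ===== SOURCE B (Python) =====
-- _THRESHOLDS = [34, 39, 44, 49, 54, 59, 64, 69, 74, 79, 200]
-- _SECONDS = {
--     "M": [10500, 10800, 11100, 11700, 12000, 12600, 13800, 14700, 15600, 16500, 17400],
--     "F": [12300, 12600, 12900, 13500, 13800, 14400, 15600, 16500, 17400, 18300, 19200],
-- }
--
--
-- def get_boston_qual_time(age: int, gender: str) -> int:
--     """Return Boston Marathon qualifying time (in seconds) for given age and gender."""
--     gender = gender.upper()[0] if gender else "M"
--     if gender not in ("M", "F"):
--         raise ValueError("Gender must be 'M' or 'F'")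
--     # binary search (bisect_left) over the sorted age thresholds
--     lo, hi = 0, len(_THRESHOLDS)
--     while lo < hi:
--         mid = (lo + hi) // 2
--         if _THRESHOLDS[mid] < age:
--             lo = mid + 1
--         else:
--             hi = mid
--     if lo == len(_THRESHOLDS):
--         return 999999
--     return _SECONDS[gender][lo]
-- ===== Notes on version B (the rewrite author's own statement) =====
-- stated objective: alternative
-- what changed: Replaces A's linear first-match scan over a table of time strings parsed on every call with a bisect_left binary search over a sorted threshold list indexing precomputed integer seconds.
-- outside the precondition, e.g. on get_boston_qual_time(30, 'x'): A raises ValueError, B raises ValueError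
import Mathlib
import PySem

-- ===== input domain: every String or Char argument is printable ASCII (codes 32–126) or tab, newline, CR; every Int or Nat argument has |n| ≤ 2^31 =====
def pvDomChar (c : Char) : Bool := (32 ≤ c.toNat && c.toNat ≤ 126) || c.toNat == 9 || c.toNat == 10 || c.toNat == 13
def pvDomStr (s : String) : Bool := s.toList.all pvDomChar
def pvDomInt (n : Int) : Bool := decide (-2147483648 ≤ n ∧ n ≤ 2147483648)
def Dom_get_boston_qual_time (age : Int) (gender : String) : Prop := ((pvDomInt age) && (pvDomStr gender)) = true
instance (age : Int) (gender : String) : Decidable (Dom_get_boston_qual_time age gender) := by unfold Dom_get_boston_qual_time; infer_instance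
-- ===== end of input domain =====

-- B replaces A's linear first-match scan over "H:MM:SS" strings parsed on every call with a
-- bisect_left binary search over sorted thresholds indexing precomputed integer seconds.

-- ===== PORT A =====
-- gender.upper()[0] if gender else "M"  (a length-1 Python string, ported as its Char;
-- the getD default is unreachable since gender ≠ "" in that branch)
def pvNormalize (gender : String) : Char :=
  if gender = "" then 'M'
  else (PySem.Str.pyGet? (PySem.Str.upper gender) 0).getD 'M'

def pvStandards : List (Int × PySem.Dict Char String) :=
  [(34, ⟨[('M', "2:55:00"), ('F', "3:25:00")]⟩),
   (39, ⟨[('M', "3:00:00"), ('F', "3:30:00")]⟩),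
   (44, ⟨[('M', "3:05:00"), ('F', "3:35:00")]⟩),
   (49, ⟨[('M', "3:15:00"), ('F', "3:45:00")]⟩),
   (54, ⟨[('M', "3:20:00"), ('F', "3:50:00")]⟩),
   (59, ⟨[('M', "3:30:00"), ('F', "4:00:00")]⟩),
   (64, ⟨[('M', "3:50:00"), ('F', "4:20:00")]⟩),
   (69, ⟨[('M', "4:05:00"), ('F', "4:35:00")]⟩),
   (74, ⟨[('M', "4:20:00"), ('F', "4:50:00")]⟩),
   (79, ⟨[('M', "4:35:00"), ('F', "5:05:00")]⟩),
   (200, ⟨[('M', "4:50:00"), ('F', "5:20:00")]⟩)]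

-- h, m, s = map(int, t.split(":")); h*3600 + m*60 + s
-- (a shape other than three int fields raises in Python; unreachable on the literal table)
def pvHMS (t : String) : Int :=
  match ((PySem.Str.split? t ":").getD []).map (fun x => (PySem.Int.ofStr? x).getD 0) with
  | [h, m, s] => h * 3600 + m * 60 + s
  | _ => 0

def pvScan (age : Int) (g : Char) : List (Int × PySem.Dict Char String) → Int
  | [] => 999999
  | (ua, times) :: rest =>
    if age ≤ ua then pvHMS (PySem.Dict.getD times g "") else pvScan age g rest

def get_boston_qual_time (age : Int) (gender : String) : Int :=
  if pvNormalize gender = 'M' ∨ pvNormalize gender = 'F' then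
    pvScan age (pvNormalize gender) pvStandards
  else 0  -- Python raises ValueError here; excluded by Pre_

-- ===== PORT B =====
def pvThresholds : List Int := [34, 39, 44, 49, 54, 59, 64, 69, 74, 79, 200]

def pvSecondsTbl : PySem.Dict Char (List Int) :=
  ⟨[('M', [10500, 10800, 11100, 11700, 12000, 12600, 13800, 14700, 15600, 16500, 17400]),
    ('F', [12300, 12600, 12900, 13500, 13800, 14400, 15600, 16500, 17400, 18300, 19200])]⟩

-- the while-loop of Source B; fuel = 11 ≥ hi - lo bounds the iterations (a totality guard only)
def pvBisect (age : Int) : Nat → Nat → Nat → Nat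
  | 0, lo, _ => lo
  | fuel + 1, lo, hi =>
    if lo < hi then
      let mid := (lo + hi) / 2
      if pvThresholds.getD mid 0 < age then pvBisect age fuel (mid + 1) hi
      else pvBisect age fuel lo mid
    else lo

def pvLookup (age : Int) (g : Char) : Int :=
  let lo := pvBisect age 11 0 11
  if lo = 11 then 999999
  else (PySem.Dict.getD pvSecondsTbl g []).getD lo 0

def get_boston_qual_time_alt (age : Int) (gender : String) : Int :=
  if pvNormalize gender = 'M' ∨ pvNormalize gender = 'F' then
    pvLookup age (pvNormalize gender)
  else 0  -- Source B raises ValueError here; excluded by Pre_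

-- ===== PRECONDITION & SPEC =====
-- Pre_ excludes exactly the gender strings whose uppercased first character is neither 'M'
-- nor 'F': on those both A and B raise ValueError (no value is returned).
def Pre_get_boston_qual_time (age : Int) (gender : String) : Prop :=
  gender = "" ∨ PySem.Str.pyGet? (PySem.Str.upper gender) 0 = some 'M'
    ∨ PySem.Str.pyGet? (PySem.Str.upper gender) 0 = some 'F'
instance (age : Int) (gender : String) : Decidable (Pre_get_boston_qual_time age gender) := by
  unfold Pre_get_boston_qual_time; infer_instance

def pvWitness_get_boston_qual_time : Int × String := (30, "M")

def Spec_get_boston_qual_time (age : Int) (gender : String) (out : Int) : Prop := out = get_boston_qual_time_alt age gender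
instance (age : Int) (gender : String) (out : Int) : Decidable (Spec_get_boston_qual_time age gender out) := by unfold Spec_get_boston_qual_time; infer_instance

-- ===== CLAIM (what is proved, stated in full; the proofs are below) =====
def Claim_equal_get_boston_qual_time : Prop := ∀ (age : Int) (gender : String), Dom_get_boston_qual_time age gender → Pre_get_boston_qual_time age gender → Spec_get_boston_qual_time age gender (get_boston_qual_time age gender)

-- ===== LEMMAS AND PROOFS =====

set_option maxHeartbeats 1000000 in
lemma pvCore_M (age : Int) : pvScan age 'M' pvStandards = pvLookup age 'M' := by
  simp only [pvScan, pvStandards, pvLookup]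
  simp [pvBisect, pvThresholds, pvSecondsTbl, PySem.Dict.getD, PySem.Dict.get?]
  split_ifs <;> first | decide | omega | simp_all

set_option maxHeartbeats 1000000 in
lemma pvCore_F (age : Int) : pvScan age 'F' pvStandards = pvLookup age 'F' := by
  simp only [pvScan, pvStandards, pvLookup]
  simp [pvBisect, pvThresholds, pvSecondsTbl, PySem.Dict.getD, PySem.Dict.get?]
  split_ifs <;> first | decide | omega | simp_all

lemma pvNorm_MF (gender : String) (h : Pre_get_boston_qual_time 0 gender) :
    pvNormalize gender = 'M' ∨ pvNormalize gender = 'F' := by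
  unfold pvNormalize
  rcases h with h | h | h
  · simp [h]
  · split_ifs with he
    · exact Or.inl rfl
    · left; simp at h ⊢; simp [h]
  · split_ifs with he
    · exact Or.inl rfl
    · right; simp at h ⊢; simp [h]

-- ===== VERDICT (by name: the statement is the Claim_ definition above) =====
theorem get_boston_qual_time_spec : Claim_equal_get_boston_qual_time := by
  intro age gender _ hpre
  unfold Spec_get_boston_qual_time get_boston_qual_time get_boston_qual_time_alt
  rcases pvNorm_MF gender (by exact hpre) with hg | hg
  · rw [hg, if_pos (show ('M' : Char) = 'M' ∨ ('M' : Char) = 'F' from Or.inl rfl)]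
    exact pvCore_M age
  · rw [hg, if_pos (show ('F' : Char) = 'M' ∨ ('F' : Char) = 'F' from Or.inr rfl)]
    exact pvCore_F age
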